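-- pv_equiv track=rewrite | github.com/nera0875/agi | agi/backend/agents/workflows/knowledge_validation_workflow.py | _classify_contradictions_by_severity
-- ===== SOURCE A (Python) =====
-- from typing import Any, Dict, List, Optional, Set
--
-- def _classify_contradictions_by_severity(contradictions: List[Dict[str, Any]]) -> Dict[str, List[Dict[str, Any]]]:
--     """Classer les contradictions par sévérité."""
--     classified = {"critical": [], "moderate": [], "minor": []}
--
--     for contradiction in contradictions:
--         severity = contradiction.get("severity", "minor")
--         if severity in classified:
--             classified[severity].append(contradiction)
--         else:
--             classified["minor"].append(contradiction)
--
--     return classified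
-- ===== SOURCE B (Python) =====
-- def _classify_contradictions_by_severity(contradictions):
--     """Classer les contradictions par sévérité."""
--     return {
--         "critical": [c for c in contradictions if c.get("severity") == "critical"],
--         "moderate": [c for c in contradictions if c.get("severity") == "moderate"],
--         "minor": [c for c in contradictions
--                   if c.get("severity", "minor") not in {"critical", "moderate"}],
--     }
-- ===== Notes on version B (the rewrite author's own statement) =====
-- stated objective: simpler
-- what changed: Replaces A's single bucketing loop over a mutable three-key dict (with a membership test and fallback branch per element) by three independent filtered passes, one list comprehension per severity bucket.
import Mathlib
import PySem

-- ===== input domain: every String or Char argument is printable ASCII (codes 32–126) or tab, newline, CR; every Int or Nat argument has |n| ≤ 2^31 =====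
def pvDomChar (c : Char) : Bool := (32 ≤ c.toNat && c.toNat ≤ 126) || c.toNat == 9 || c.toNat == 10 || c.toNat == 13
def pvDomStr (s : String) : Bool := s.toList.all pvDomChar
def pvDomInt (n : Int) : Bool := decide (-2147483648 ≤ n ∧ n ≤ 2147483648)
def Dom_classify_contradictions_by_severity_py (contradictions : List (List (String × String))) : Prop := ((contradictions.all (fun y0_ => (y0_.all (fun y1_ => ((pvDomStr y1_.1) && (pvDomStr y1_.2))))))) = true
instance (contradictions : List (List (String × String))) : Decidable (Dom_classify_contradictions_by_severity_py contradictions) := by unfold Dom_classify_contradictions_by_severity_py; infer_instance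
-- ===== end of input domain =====

-- B replaces A's single bucketing loop over a mutable dict by three independent
-- filtered passes, one per severity bucket (objective: simpler decomposition, same cost).

-- ===== PORT A =====
-- A: build the dict {"critical": [], "moderate": [], "minor": []}, then for each
-- contradiction append it to the bucket named by its severity (default "minor"),
-- falling back to "minor" for a severity that is not a key of the dict.
def classify_contradictions_by_severity_py (contradictions : List (List (String × String))) : List (String × List (List (String × String))) :=
  let classified : PySem.Dict String (List (List (String × String))) :=
    PySem.Dict.ofList [("critical", []), ("moderate", []), ("minor", [])]
  let final := contradictions.foldl (fun d contradiction =>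
    let severity := (PySem.Dict.mk contradiction).getD "severity" "minor"
    if d.contains severity then
      d.modify severity [] (fun l => l ++ [contradiction])
    else
      d.modify "minor" [] (fun l => l ++ [contradiction])) classified
  final.items

-- ===== PORT B =====
-- B: one filtered pass per bucket.
def classify_contradictions_by_severity_py_alt (contradictions : List (List (String × String))) : List (String × List (List (String × String))) :=
  [("critical", contradictions.filter (fun c => (PySem.Dict.mk c).get? "severity" == some "critical")),
   ("moderate", contradictions.filter (fun c => (PySem.Dict.mk c).get? "severity" == some "moderate")),
   ("minor", contradictions.filter (fun c =>
      !((PySem.Dict.mk c).getD "severity" "minor" == "critical"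
        || (PySem.Dict.mk c).getD "severity" "minor" == "moderate")))]

-- ===== PRECONDITION & SPEC =====
def Spec_classify_contradictions_by_severity_py (contradictions : List (List (String × String))) (out : List (String × List (List (String × String)))) : Prop := out = classify_contradictions_by_severity_py_alt contradictions
instance (contradictions : List (List (String × String))) (out : List (String × List (List (String × String)))) : Decidable (Spec_classify_contradictions_by_severity_py contradictions out) := by unfold Spec_classify_contradictions_by_severity_py; infer_instance

-- ===== CLAIM (what is proved, stated in full; the proofs are below) =====
def Claim_equal_classify_contradictions_by_severity_py : Prop := ∀ (contradictions : List (List (String × String))), Dom_classify_contradictions_by_severity_py contradictions → Spec_classify_contradictions_by_severity_py contradictions (classify_contradictions_by_severity_py contradictions)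

-- ===== LEMMAS AND PROOFS =====

-- The loop invariant: starting from any contents of the three fixed buckets, A's fold
-- appends to each bucket exactly the elements B's corresponding filter keeps.
theorem classify_fold_invariant (cs : List (List (String × String)))
    (ca ma na : List (List (String × String))) :
    cs.foldl (fun d contradiction =>
      if d.contains ((PySem.Dict.mk contradiction).getD "severity" "minor") then
        d.modify ((PySem.Dict.mk contradiction).getD "severity" "minor") [] (fun l => l ++ [contradiction])
      else
        d.modify "minor" [] (fun l => l ++ [contradiction]))
      (PySem.Dict.mk [("critical", ca), ("moderate", ma), ("minor", na)])
    = PySem.Dict.mk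
        [("critical", ca ++ cs.filter (fun c => (PySem.Dict.mk c).get? "severity" == some "critical")),
         ("moderate", ma ++ cs.filter (fun c => (PySem.Dict.mk c).get? "severity" == some "moderate")),
         ("minor", na ++ cs.filter (fun c =>
            !((PySem.Dict.mk c).getD "severity" "minor" == "critical"
              || (PySem.Dict.mk c).getD "severity" "minor" == "moderate")))] := by
  induction cs generalizing ca ma na with
  | nil => simp
  | cons c rest ih =>
    simp only [List.foldl_cons, List.filter_cons]
    by_cases hc : (PySem.Dict.mk c).getD "severity" "minor" = "critical"
    · have hg : (PySem.Dict.mk c).get? "severity" = some "critical" := by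
        rcases h : (PySem.Dict.mk c).get? "severity" with _ | v
        · simp [PySem.Dict.getD_eq_get?_getD, h] at hc
        · simp [PySem.Dict.getD_eq_get?_getD, h] at hc; rw [hc]
      rw [hc]
      have hstep :
          ((PySem.Dict.mk [("critical", ca), ("moderate", ma), ("minor", na)]).contains "critical" = true) := by
        simp [PySem.Dict.contains]
      rw [hstep, if_pos rfl]
      have hmod : ((PySem.Dict.mk [("critical", ca), ("moderate", ma), ("minor", na)]).modify
            "critical" [] (fun l => l ++ [c]))
          = PySem.Dict.mk [("critical", ca ++ [c]), ("moderate", ma), ("minor", na)] := by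
        simp [PySem.Dict.modify, PySem.Dict.getD, PySem.Dict.get?, PySem.Dict.insert,
          PySem.Dict.contains]
      rw [hmod, ih]
      simp [hg]
    · by_cases hm : (PySem.Dict.mk c).getD "severity" "minor" = "moderate"
      · have hg : (PySem.Dict.mk c).get? "severity" = some "moderate" := by
          rcases h : (PySem.Dict.mk c).get? "severity" with _ | v
          · simp [PySem.Dict.getD_eq_get?_getD, h] at hm
          · simp [PySem.Dict.getD_eq_get?_getD, h] at hm; rw [hm]
        rw [hm]
        have hstep :
            ((PySem.Dict.mk [("critical", ca), ("moderate", ma), ("minor", na)]).contains "moderate" = true) := by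
          simp [PySem.Dict.contains]
        rw [hstep, if_pos rfl]
        have hmod : ((PySem.Dict.mk [("critical", ca), ("moderate", ma), ("minor", na)]).modify
              "moderate" [] (fun l => l ++ [c]))
            = PySem.Dict.mk [("critical", ca), ("moderate", ma ++ [c]), ("minor", na)] := by
          simp [PySem.Dict.modify, PySem.Dict.getD, PySem.Dict.get?, PySem.Dict.insert,
            PySem.Dict.contains]
        rw [hmod, ih]
        have hgc : ¬ (PySem.Dict.mk c).get? "severity" = some "critical" := by
          rw [hg]; simp
        simp [hg]
      · -- severity is "minor" or an unknown string: both land in the minor bucket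
        have hgc : ¬ (PySem.Dict.mk c).get? "severity" = some "critical" := by
          intro h; simp [PySem.Dict.getD_eq_get?_getD, h] at hc
        have hgm : ¬ (PySem.Dict.mk c).get? "severity" = some "moderate" := by
          intro h; simp [PySem.Dict.getD_eq_get?_getD, h] at hm
        have hmod : ((PySem.Dict.mk [("critical", ca), ("moderate", ma), ("minor", na)]).modify
              "minor" [] (fun l => l ++ [c]))
            = PySem.Dict.mk [("critical", ca), ("moderate", ma), ("minor", na ++ [c])] := by
          simp [PySem.Dict.modify, PySem.Dict.getD, PySem.Dict.get?, PySem.Dict.insert,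
            PySem.Dict.contains]
        by_cases hmin : (PySem.Dict.mk c).getD "severity" "minor" = "minor"
        · rw [hmin]
          have hstep :
              ((PySem.Dict.mk [("critical", ca), ("moderate", ma), ("minor", na)]).contains "minor" = true) := by
            simp [PySem.Dict.contains]
          rw [hstep, if_pos rfl]
          rw [hmod, ih]
          simp [hgc, hgm]
        · have hstep :
              ((PySem.Dict.mk [("critical", ca), ("moderate", ma), ("minor", na)]).contains
                ((PySem.Dict.mk c).getD "severity" "minor") = false) := by
            simp [PySem.Dict.contains]
            exact ⟨fun h => hc h.symm, fun h => hm h.symm, fun h => hmin h.symm⟩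
          rw [hstep, if_neg (by simp)]
          rw [hmod, ih]
          simp [hgc, hgm, hc, hm]

-- ===== VERDICT (by name: the statement is the Claim_ definition above) =====
theorem classify_contradictions_by_severity_py_spec : Claim_equal_classify_contradictions_by_severity_py := by
  intro cs _
  show ((cs.foldl (fun d contradiction =>
      if d.contains ((PySem.Dict.mk contradiction).getD "severity" "minor") then
        d.modify ((PySem.Dict.mk contradiction).getD "severity" "minor") [] (fun l => l ++ [contradiction])
      else
        d.modify "minor" [] (fun l => l ++ [contradiction]))
      (PySem.Dict.mk [("critical", []), ("moderate", []), ("minor", [])])).items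
    = classify_contradictions_by_severity_py_alt cs)
  rw [classify_fold_invariant]
  simp [classify_contradictions_by_severity_py_alt]
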